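-- pv_equiv track=rewrite | github.com/gkundlatsch/TerSP-TerFac | sequence_generator_maximum1.4.py | multiset_permutations
-- ===== SOURCE A (Python) =====
-- def multiset_permutations(iterable):
--     """
--     Generate all unique orderings (permutations) of the elements in 'iterable',
--     which may contain duplicates.
--
--     This is a recursive generator that yields each unique permutation.
--     """
--     pool = tuple(iterable)
--     n = len(pool)
--     if n == 0:
--         return
--     counter = {}
--     for item in pool:
--         counter[item] = counter.get(item, 0) + 1
--
--     def backtrack(path, counter):
--         if len(path) == n:
--             yield tuple(path)
--             return
--         for x in counter:
--             if counter[x] > 0: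
--                 counter[x] -= 1
--                 path.append(x)
--                 yield from backtrack(path, counter)
--                 path.pop()
--                 counter[x] += 1
--
--     yield from backtrack([], counter)
-- ===== SOURCE B (Python) =====
-- def multiset_permutations(iterable):
--     """Iterative DFS with an explicit stack of (path, counts) frames over
--     integer ranks in first-appearance order; same yield order as the
--     recursive generator."""
--     pool = tuple(iterable)
--     n = len(pool)
--     if n == 0:
--         return
--     keys = []
--     for item in pool:
--         if item not in keys:
--             keys.append(item)
--     counts = tuple(pool.count(k) for k in keys)
--     stack = [((), counts)]
--     while stack:
--         path, cnts = stack.pop()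
--         if len(path) == n:
--             yield tuple(keys[i] for i in path)
--             continue
--         for i in reversed(range(len(cnts))):
--             if cnts[i] > 0:
--                 stack.append((path + (i,), cnts[:i] + (cnts[i] - 1,) + cnts[i + 1:]))
-- ===== Notes on version B (the rewrite author's own statement) =====
-- stated objective: alternative
-- what changed: Replaces the recursive generator (mutable path list + counter dict, yields via nested 'yield from') by an iterative DFS driven by an explicit stack of immutable (index-path, count-vector) frames over integer ranks in first-appearance order; children are pushed in reverse so the yield order is identical.
import Mathlib
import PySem

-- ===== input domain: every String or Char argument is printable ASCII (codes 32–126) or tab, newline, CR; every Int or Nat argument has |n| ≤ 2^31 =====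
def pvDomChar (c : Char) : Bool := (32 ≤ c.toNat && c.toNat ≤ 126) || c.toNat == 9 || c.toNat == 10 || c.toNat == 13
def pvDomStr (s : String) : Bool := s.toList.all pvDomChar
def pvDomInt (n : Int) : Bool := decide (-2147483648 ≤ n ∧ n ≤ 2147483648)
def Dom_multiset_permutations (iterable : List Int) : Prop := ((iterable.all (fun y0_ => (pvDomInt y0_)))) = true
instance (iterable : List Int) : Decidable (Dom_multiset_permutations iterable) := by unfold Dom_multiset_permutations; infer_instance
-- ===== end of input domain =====

-- B replaces A's recursive generator (mutable path + counter dict) by an iterative DFS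
-- over an explicit stack of immutable (index path, count vector) frames; same output, same order.

-- ===== PORT A =====
-- `backtrack(path, counter)`: the recursion is fuel-bounded only to make it total in Lean;
-- fuel starts at n+1, while the reachable recursion depth is at most n.
def pvBacktrack (n : Nat) : Nat → List Int → PySem.Dict Int Int → List (List Int)
  | 0, _, _ => []
  | fuel + 1, path, counter =>
      if path.length = n then [path]
      else
        -- `for x in counter: if counter[x] > 0: counter[x] -= 1; path.append(x); yield from …`
        -- (counter[x] on an iterated key is present: getD x 0 is exact there)
        counter.keys.foldl (fun acc x =>
          if 0 < counter.getD x 0 then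
            acc ++ pvBacktrack n fuel (path ++ [x]) (counter.insert x (counter.getD x 0 - 1))
          else acc) []

def multiset_permutations (iterable : List Int) : List (List Int) :=
  let pool := iterable
  let n := pool.length
  if n = 0 then []
  else
    let counter := pool.foldl (fun d x => d.insert x (d.getD x 0 + 1)) PySem.Dict.empty
    pvBacktrack n (n + 1) [] counter

-- ===== PORT B =====
-- potential of a stack frame; only used for the while-loop's termination measure
def pvPhi (f : List Nat × List Int) : Nat := (f.2.length + 1) ^ (f.2.map Int.toNat).sum

-- the `for i in reversed(range(len(cnts))): if cnts[i] > 0: stack.append(…)` push loop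
-- (cnts[:i] + (cnts[i]-1,) + cnts[i+1:] is cnts.set i (cnts[i]-1); indices are in range)
def pvPush (path : List Nat) (cnts : List Int) (st : List (List Nat × List Int)) :
    List (List Nat × List Int) :=
  (List.range cnts.length).reverse.foldl (fun st i =>
    if 0 < cnts.getD i 0 then (path ++ [i], cnts.set i (cnts.getD i 0 - 1)) :: st else st) st

-- characterisation of the push loop (cited by pvRun's termination proof and the claim proof)
lemma pvPush_eq (path : List Nat) (cnts : List Int) (st : List (List Nat × List Int)) :
    pvPush path cnts st =
      ((List.range cnts.length).filter (fun i => decide (0 < cnts.getD i 0))).map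
        (fun i => (path ++ [i], cnts.set i (cnts.getD i 0 - 1))) ++ st := by
  unfold pvPush
  rw [List.foldl_reverse]
  induction (List.range cnts.length) with
  | nil => simp
  | cons a l ih =>
    rw [List.foldr_cons, ih, List.filter_cons]
    by_cases h : 0 < cnts.getD a 0
    · rw [if_pos h, if_pos (by simpa using h)]; simp
    · rw [if_neg h, if_neg (by simpa using h)]

-- one count strictly positive is decremented: the Nat-sum of the counts drops by one
lemma pvSumNat_set (cnts : List Int) (i : Nat) (hi : i < cnts.length)
    (hc : 0 < cnts.getD i 0) :
    ((cnts.set i (cnts.getD i 0 - 1)).map Int.toNat).sum + 1 = (cnts.map Int.toNat).sum := by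
  induction cnts generalizing i with
  | nil => simp at hi
  | cons c cs ih =>
    cases i with
    | zero => simp at hc ⊢; omega
    | succ j =>
      have := ih j (by simpa using hi) (by simpa using hc)
      simp only [List.getD_cons_succ, List.set_cons_succ, List.map_cons, List.sum_cons]
      omega

-- the push loop strictly decreases the total potential (cited by pvRun's decreasing_by)
lemma pvPush_measure (path : List Nat) (cnts : List Int) (st : List (List Nat × List Int)) :
    ((pvPush path cnts st).map pvPhi).sum < pvPhi (path, cnts) + (st.map pvPhi).sum := by
  rw [pvPush_eq, List.map_append, List.sum_append]
  have hphi : 0 < pvPhi (path, cnts) := Nat.pow_pos (Nat.succ_pos _)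
  rcases hF : (List.range cnts.length).filter (fun i => decide (0 < cnts.getD i 0)) with _ | ⟨i0, F'⟩
  · simpa [hF] using hphi
  · set F := i0 :: F' with hFdef
    have hFsub : ∀ i ∈ F, i < cnts.length ∧ 0 < cnts.getD i 0 := by
      intro i hiF
      rw [← hF] at hiF
      exact ⟨List.mem_range.mp (List.mem_of_mem_filter hiF), by simpa using List.of_mem_filter hiF⟩
    set s := (cnts.map Int.toNat).sum with hs
    have hs1 : 1 ≤ s := by
      obtain ⟨hi0, hc0⟩ := hFsub i0 (by simp [hFdef])
      have hmem : cnts.getD i0 0 ∈ cnts := by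
        rw [List.getD_eq_getElem cnts 0 hi0]; exact List.getElem_mem hi0
      have : (cnts.getD i0 0).toNat ∈ cnts.map Int.toNat := List.mem_map_of_mem hmem
      have := List.le_sum_of_mem this
      omega
    have hconst : ∀ i ∈ F, pvPhi (path ++ [i], cnts.set i (cnts.getD i 0 - 1)) = (cnts.length + 1) ^ (s - 1) := by
      intro i hiF
      obtain ⟨hi, hc⟩ := hFsub i hiF
      have hsum := pvSumNat_set cnts i hi hc
      simp only [pvPhi, List.length_set]
      congr 1
      omega
    have hmapped : ((F.map (fun i => (path ++ [i], cnts.set i (cnts.getD i 0 - 1)))).map pvPhi).sum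
        = F.length * ((cnts.length + 1) ^ (s - 1)) := by
      rw [List.map_map]
      have hcg : List.map (pvPhi ∘ fun i => (path ++ [i], cnts.set i (cnts.getD i 0 - 1))) F
          = List.map (fun _ => (cnts.length + 1) ^ (s - 1)) F :=
        List.map_congr_left (fun i hi => hconst i hi)
      rw [hcg]
      exact PySem.List.sum_map_const_nat F _
    rw [hmapped]
    have hFlen : F.length ≤ cnts.length := by
      rw [← hF]
      exact le_trans (List.length_filter_le _ _) (by simp)
    have hpow : F.length * ((cnts.length + 1) ^ (s - 1)) < (cnts.length + 1) ^ s := by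
      calc F.length * ((cnts.length + 1) ^ (s - 1))
          < (cnts.length + 1) * ((cnts.length + 1) ^ (s - 1)) :=
            Nat.mul_lt_mul_of_lt_of_le (by omega) (le_refl _) (Nat.pow_pos (Nat.succ_pos _))
        _ = (cnts.length + 1) ^ (s - 1 + 1) := by rw [Nat.pow_succ]; ring
        _ = (cnts.length + 1) ^ s := by congr 1; omega
    have : pvPhi (path, cnts) = (cnts.length + 1) ^ s := rfl
    omega

-- `while stack: path, cnts = stack.pop(); …` (head of the list = top of the stack;
-- keys[i] on a reachable frame has i < keys.length, where getD i 0 is exact)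
def pvRun (n : Nat) (keys : List Int) : List (List Nat × List Int) → List (List Int)
  | [] => []
  | (path, cnts) :: rest =>
      if path.length = n then (path.map (fun i => keys.getD i 0)) :: pvRun n keys rest
      else pvRun n keys (pvPush path cnts rest)
termination_by st => (st.map pvPhi).sum
decreasing_by
  · simp only [List.map_cons, List.sum_cons]
    have : 0 < pvPhi (path, cnts) := Nat.pow_pos (Nat.succ_pos _)
    omega
  · exact pvPush_measure path cnts rest

def multiset_permutations_alt (iterable : List Int) : List (List Int) :=
  let pool := iterable
  let n := pool.length
  if n = 0 then []
  else
    let keys := PySem.Set.ofList pool   -- the `if item not in keys: keys.append(item)` loop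
    let counts := keys.map (fun k => (PySem.List.count pool k : Int))
    pvRun n keys [([], counts)]

-- ===== PRECONDITION & SPEC =====
def Spec_multiset_permutations (iterable : List Int) (out : List (List Int)) : Prop := out = multiset_permutations_alt iterable
instance (iterable : List Int) (out : List (List Int)) : Decidable (Spec_multiset_permutations iterable out) := by unfold Spec_multiset_permutations; infer_instance

-- ===== CLAIM (what is proved, stated in full; the proofs are below) =====
def Claim_equal_multiset_permutations : Prop := ∀ (iterable : List Int), Dom_multiset_permutations iterable → Spec_multiset_permutations iterable (multiset_permutations iterable)

-- ===== LEMMAS AND PROOFS =====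

-- the common recursion tree: DFS over (index path, count vector), children in index order
def pvDfs (n : Nat) (keys : List Int) (path : List Nat) (cnts : List Int) : List (List Int) :=
  if path.length = n then [path.map (fun i => keys.getD i 0)]
  else
    ((List.range cnts.length).filter (fun i => decide (0 < cnts.getD i 0))).attach.flatMap
      (fun i => pvDfs n keys (path ++ [i.1]) (cnts.set i.1 (cnts.getD i.1 0 - 1)))
termination_by (cnts.map Int.toNat).sum
decreasing_by
  obtain ⟨i, hmem⟩ := i
  have hi : i < cnts.length := List.mem_range.mp (List.mem_of_mem_filter hmem)
  have hc : 0 < cnts.getD i 0 := by simpa using List.of_mem_filter hmem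
  exact lt_of_lt_of_eq (Nat.lt_succ_self _) (pvSumNat_set cnts i hi hc)

lemma pvFlatMap_attach {α β : Type} (l : List α) (h : α → List β) :
    l.attach.flatMap (fun x => h x.1) = l.flatMap h := by
  conv_rhs => rw [← List.attach_map_subtype_val l]
  rw [List.flatMap_map]

-- B's loop runs the DFS of every stacked frame, in order
lemma pvRun_eq_flatMap (n : Nat) (keys : List Int) (st : List (List Nat × List Int)) :
    pvRun n keys st = st.flatMap (fun f => pvDfs n keys f.1 f.2) := by
  induction st using pvRun.induct n with
  | case1 => simp [pvRun]
  | case2 path cnts rest h ih =>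
      rw [pvRun, if_pos h, ih, List.flatMap_cons, pvDfs, if_pos h]
      simp
  | case3 path cnts rest h ih =>
      rw [pvRun, if_neg h, ih, pvPush_eq, List.flatMap_append, List.flatMap_cons, pvDfs, if_neg h]
      congr 1
      rw [List.flatMap_map]
      exact (pvFlatMap_attach _ _).symm

-- the association dict corresponding to (keys, cnts)
def pvDictOf (keys : List Int) (cnts : List Int) : PySem.Dict Int Int :=
  PySem.Dict.mk (keys.zip cnts)

lemma pvFlatMap_filter {α β : Type} (l : List α) (p : α → Bool) (g : α → List β) :
    (l.filter p).flatMap g = l.flatMap (fun x => if p x then g x else []) := by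
  induction l with
  | nil => simp
  | cons a t ih => by_cases h : p a <;> simp [h, ih]

lemma pvFlatMap_range {α β : Type} (l : List α) (d : α) (h : α → List β) :
    (List.range l.length).flatMap (fun i => h (l.getD i d)) = l.flatMap h := by
  induction l generalizing h with
  | nil => simp
  | cons a t ih =>
    rw [List.length_cons, List.range_succ_eq_map, List.flatMap_cons, List.flatMap_map]
    simp only [List.getD_cons_zero, List.getD_cons_succ]
    rw [ih (fun x => h x)]
    simp

lemma pvDictOf_keys (keys cnts : List Int) (hlen : cnts.length = keys.length) :
    (pvDictOf keys cnts).keys = keys := by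
  simp only [pvDictOf, PySem.Dict.keys]
  exact List.map_fst_zip (le_of_eq hlen.symm)

lemma pvDictOf_getD (keys cnts : List Int) (hnd : keys.Nodup)
    (hlen : cnts.length = keys.length) (i : Nat) (hi : i < keys.length) :
    (pvDictOf keys cnts).getD (keys.getD i 0) 0 = cnts.getD i 0 := by
  induction keys generalizing cnts i with
  | nil => simp at hi
  | cons k ks ih =>
    cases cnts with
    | nil => simp at hlen
    | cons c cs =>
      cases i with
      | zero =>
        simp only [List.getD_cons_zero]
        rw [PySem.Dict.getD_eq_get?_getD]
        show ((PySem.Dict.mk ((k, c) :: ks.zip cs)).get? k).getD 0 = c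
        rw [PySem.Dict.get?_mk_cons]
        simp
      | succ j =>
        have hj : j < ks.length := by simpa using hi
        have hkmem : ks.getD j 0 ∈ ks := by
          rw [List.getD_eq_getElem ks 0 hj]; exact List.getElem_mem hj
        have hk : k ≠ ks.getD j 0 := fun he => (List.nodup_cons.mp hnd).1 (he ▸ hkmem)
        simp only [List.getD_cons_succ]
        rw [PySem.Dict.getD_eq_get?_getD]
        show ((PySem.Dict.mk ((k, c) :: ks.zip cs)).get? (ks.getD j 0)).getD 0 = cs.getD j 0
        rw [PySem.Dict.get?_mk_cons, if_neg (by simpa using hk)]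
        rw [← PySem.Dict.getD_eq_get?_getD]
        exact ih cs (List.nodup_cons.mp hnd).2 (by simpa using hlen) j hj

lemma pvZip_replace (keys cnts : List Int) (hnd : keys.Nodup)
    (hlen : cnts.length = keys.length) (i : Nat) (hi : i < keys.length) (v : Int) :
    (keys.zip cnts).map
        (fun p => if p.1 == keys.getD i 0 then (keys.getD i 0, v) else p) =
      keys.zip (cnts.set i v) := by
  induction keys generalizing cnts i with
  | nil => simp at hi
  | cons k ks ih =>
    cases cnts with
    | nil => simp at hlen
    | cons c cs =>
      have hknotin : k ∉ ks := (List.nodup_cons.mp hnd).1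
      cases i with
      | zero =>
        simp only [List.getD_cons_zero, List.zip_cons_cons, List.map_cons, List.set_cons_zero]
        rw [if_pos (by simp)]
        congr 1
        have hid : ∀ p ∈ ks.zip cs, (if p.1 == k then (k, v) else p) = p := by
          intro p hp
          obtain ⟨p1, p2⟩ := p
          have hp1 : p1 ∈ ks := (List.of_mem_zip hp).1
          have hne : p1 ≠ k := fun he => hknotin (he ▸ hp1)
          simp [hne]
        rw [List.map_congr_left hid, List.map_id']
      | succ j =>
        have hj : j < ks.length := by simpa using hi
        have hkmem : ks.getD j 0 ∈ ks := by
          rw [List.getD_eq_getElem ks 0 hj]; exact List.getElem_mem hj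
        have hk : k ≠ ks.getD j 0 := fun he => hknotin (he ▸ hkmem)
        simp only [List.getD_cons_succ, List.zip_cons_cons, List.map_cons, List.set_cons_succ]
        rw [if_neg (by simpa using hk)]
        congr 1
        exact ih cs (List.nodup_cons.mp hnd).2 (by simpa using hlen) j hj

lemma pvDictOf_insert (keys cnts : List Int) (hnd : keys.Nodup)
    (hlen : cnts.length = keys.length) (i : Nat) (hi : i < keys.length) (v : Int) :
    (pvDictOf keys cnts).insert (keys.getD i 0) v = pvDictOf keys (cnts.set i v) := by
  have hcont : (pvDictOf keys cnts).contains (keys.getD i 0) = true := by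
    rw [PySem.Dict.contains_iff_mem_keys, pvDictOf_keys keys cnts hlen]
    rw [List.getD_eq_getElem keys 0 hi]; exact List.getElem_mem hi
  apply PySem.Dict.ext
  rw [PySem.Dict.items_insert_of_contains _ _ hcont]
  exact pvZip_replace keys cnts hnd hlen i hi v

lemma pvBacktrack_eq_pvDfs (n : Nat) (keys : List Int) (hnd : keys.Nodup)
    (fuel : Nat) (path : List Nat) (cnts : List Int) (hlen : cnts.length = keys.length)
    (hfuel : (cnts.map Int.toNat).sum < fuel) :
    pvBacktrack n fuel (path.map (fun i => keys.getD i 0)) (pvDictOf keys cnts) =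
      pvDfs n keys path cnts := by
  induction fuel generalizing path cnts with
  | zero => exact absurd hfuel (Nat.not_lt_zero _)
  | succ fuel ih =>
    rw [pvBacktrack, pvDfs]
    simp only [List.length_map]
    by_cases hn : path.length = n
    · simp [hn]
    · rw [if_neg hn, if_neg hn]
      rw [pvDictOf_keys keys cnts hlen]
      have hfun : (fun (acc : List (List Int)) (x : Int) =>
          if 0 < (pvDictOf keys cnts).getD x 0 then
            acc ++ pvBacktrack n fuel ((path.map fun i => keys.getD i 0) ++ [x])
              ((pvDictOf keys cnts).insert x ((pvDictOf keys cnts).getD x 0 - 1))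
          else acc) =
          (fun acc x => acc ++
            if 0 < (pvDictOf keys cnts).getD x 0 then
              pvBacktrack n fuel ((path.map fun i => keys.getD i 0) ++ [x])
                ((pvDictOf keys cnts).insert x ((pvDictOf keys cnts).getD x 0 - 1))
            else []) := by
        funext acc x
        split <;> simp
      rw [hfun, PySem.List.foldl_append_eq_flatMap, List.nil_append]
      rw [← pvFlatMap_range keys 0]
      have hatt : (List.filter (fun i => decide (0 < cnts.getD i 0)) (List.range cnts.length)).attach.flatMap
          (fun i => pvDfs n keys (path ++ [i.1]) (cnts.set i.1 (cnts.getD i.1 0 - 1)))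
          = (List.filter (fun i => decide (0 < cnts.getD i 0)) (List.range cnts.length)).flatMap
            (fun i => pvDfs n keys (path ++ [i]) (cnts.set i (cnts.getD i 0 - 1))) :=
        pvFlatMap_attach (List.filter (fun i => decide (0 < cnts.getD i 0)) (List.range cnts.length))
          (fun i => pvDfs n keys (path ++ [i]) (cnts.set i (cnts.getD i 0 - 1)))
      rw [hatt, pvFlatMap_filter, hlen]
      apply List.flatMap_congr
      intro i hi'
      have hik : i < keys.length := List.mem_range.mp hi'
      have hic : i < cnts.length := hlen ▸ hik
      rw [pvDictOf_getD keys cnts hnd hlen i hik]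
      by_cases hc : 0 < cnts.getD i 0
      · rw [if_pos hc, if_pos (by simpa using hc)]
        rw [pvDictOf_insert keys cnts hnd hlen i hik]
        have hsum := pvSumNat_set cnts i hic hc
        have := ih (path ++ [i]) (cnts.set i (cnts.getD i 0 - 1))
          (by simpa using hlen) (by omega)
        rw [← this]
        congr 1
        simp
      · rw [if_neg hc, if_neg (by simpa using hc)]

theorem multiset_permutations_spec : Claim_equal_multiset_permutations := by
  intro iterable _
  unfold Spec_multiset_permutations multiset_permutations multiset_permutations_alt
  by_cases h0 : iterable.length = 0
  · simp [h0]
  · simp only [h0, if_false]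
    set n := iterable.length with hn
    set keys := PySem.Set.ofList iterable with hkeys
    set counts := keys.map (fun k => (PySem.List.count iterable k : Int)) with hcounts
    have hnd : keys.Nodup := PySem.Set.nodup_ofList _
    have hlen : counts.length = keys.length := by rw [hcounts, List.length_map]
    rw [pvRun_eq_flatMap]
    simp only [List.flatMap_cons, List.flatMap_nil, List.append_nil]
    rw [PySem.Dict.foldl_insert_getD_add_one_eq_counter]
    have hzip : keys.zip counts = keys.map (fun k => (k, (PySem.List.count iterable k : Int))) := by
      conv_lhs => rw [show keys = keys.map id from (List.map_id keys).symm]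
      rw [List.zip_map']
      simp
    have hcounter : PySem.Dict.counter iterable = pvDictOf keys counts := by
      apply PySem.Dict.ext
      rw [PySem.Dict.items_counter]
      show List.map (fun k => (k, (List.count k iterable : Int))) (PySem.Set.ofList iterable)
          = keys.zip counts
      rw [hzip, ← hkeys]
      apply List.map_congr_left
      intro k _
      rw [PySem.List.count_eq]
    rw [hcounter]
    have hperm : keys.Perm iterable.dedup :=
      (List.perm_ext_iff_of_nodup hnd iterable.nodup_dedup).mpr
        (fun x => by rw [hkeys, PySem.Set.mem_ofList, List.mem_dedup])
    have hsum : (counts.map Int.toNat).sum = n := by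
      rw [hcounts, List.map_map]
      have hfn : (Int.toNat ∘ fun k => (PySem.List.count iterable k : Int))
          = (fun k => List.count k iterable) := by
        funext k
        simp [PySem.List.count_eq]
      rw [hfn]
      rw [(hperm.map (fun k => List.count k iterable)).sum_eq]
      rw [List.sum_map_count_dedup_eq_length]
    have hmain := pvBacktrack_eq_pvDfs n keys hnd (n + 1) [] counts hlen (by omega)
    simpa using hmain
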